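-- pv_equiv track=rewrite | github.com/lielserf/Search-in-Artificial-Intelligence---project | maze_main_man.py | h_fifo
-- ===== SOURCE A (Python) =====
-- def h_fifo(queue, num_sec_tie):
--     best_h = min(queue, key=lambda tup: tup[4])[4]
--     nodes_with_best_h = [val for val in queue if val[4] == best_h]
--     if len(nodes_with_best_h) > 1:
--         num_sec_tie += 1
--         node = min(nodes_with_best_h, key=lambda tup: tup[3])
--     else:
--         node = nodes_with_best_h[0]
--     return node, num_sec_tie
-- ===== SOURCE B (Python) =====
-- def h_fifo(queue, num_sec_tie):
--     it = iter(queue)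
--     try:
--         best = next(it)
--     except StopIteration:
--         raise ValueError("h_fifo: empty queue")
--     best_h = best[4]
--     ties = 1
--     for v in it:
--         vh = v[4]
--         if vh < best_h:
--             best, best_h, ties = v, vh, 1
--         elif vh == best_h:
--             if v[3] < best[3]:
--                 best = v
--             ties += 1
--     if ties > 1:
--         num_sec_tie += 1
--     return best, num_sec_tie
-- ===== Notes on version B (the rewrite author's own statement) =====
-- stated objective: alternative
-- what changed: Replaces A's three scans (min by h, filter of h-ties, min by g) with a single left-to-right pass that keeps the current best node (min h, then min g, first wins) and a tie counter.
import Mathlib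
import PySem

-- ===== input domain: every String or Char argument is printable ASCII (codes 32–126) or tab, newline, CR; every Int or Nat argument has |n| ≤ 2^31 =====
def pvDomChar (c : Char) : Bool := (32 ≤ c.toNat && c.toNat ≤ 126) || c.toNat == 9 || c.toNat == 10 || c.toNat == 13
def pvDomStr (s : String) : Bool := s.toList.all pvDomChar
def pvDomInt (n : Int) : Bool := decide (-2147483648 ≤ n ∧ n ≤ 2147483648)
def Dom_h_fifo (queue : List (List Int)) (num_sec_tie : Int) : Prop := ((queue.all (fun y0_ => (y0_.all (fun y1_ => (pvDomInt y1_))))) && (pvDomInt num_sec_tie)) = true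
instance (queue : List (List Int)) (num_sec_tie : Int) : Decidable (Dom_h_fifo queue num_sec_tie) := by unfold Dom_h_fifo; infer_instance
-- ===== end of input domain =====

-- B fuses A's three scans (min by h, filter of h-ties, min by g) into one pass keeping the best node and a tie counter.


-- ===== PORT A =====
-- shared key helpers: tup[4] and tup[3]; exact inside Pre_ (every row has length ≥ 5, so the default is never used)
def kH (t : List Int) : Int := PySem.List.pyGetD t 4 0
def kG (t : List Int) : Int := PySem.List.pyGetD t 3 0

def h_fifo (queue : List (List Int)) (num_sec_tie : Int) : List Int × Int :=
  let best_h : Int :=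
    match PySem.List.min? queue (fun tup => kH tup) with
    | some m => kH m
    | none => 0    -- queue = []: Python's min raises ValueError; excluded by Pre_
  let nodes_with_best_h := queue.filter (fun val => kH val == best_h)
  if nodes_with_best_h.length > 1 then
    match PySem.List.min? nodes_with_best_h (fun tup => kG tup) with
    | some node => (node, num_sec_tie + 1)
    | none => ([], num_sec_tie + 1)    -- unreachable: the list has length > 1
  else
    (PySem.List.pyGetD nodes_with_best_h 0 [], num_sec_tie)

-- ===== PORT B =====
-- loop body of B's single pass: state = (best, best_h, ties)
def bstep (st : List Int × Int × Int) (v : List Int) : List Int × Int × Int :=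
  let vh := kH v
  if vh < st.2.1 then (v, vh, 1)
  else if vh == st.2.1 then
    ((if kG v < kG st.1 then v else st.1), st.2.1, st.2.2 + 1)
  else st

def h_fifo_alt (queue : List (List Int)) (num_sec_tie : Int) : List Int × Int :=
  match queue with
  | [] => ([], num_sec_tie)    -- Python B raises ValueError here; excluded by Pre_
  | first :: rest =>
    let s := rest.foldl bstep (first, kH first, 1)
    (s.1, if s.2.2 > 1 then num_sec_tie + 1 else num_sec_tie)

-- ===== PRECONDITION & SPEC =====
-- exactly where the Python A returns: nonempty queue (min of [] raises) and every row long enough for tup[4]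
def Pre_h_fifo (queue : List (List Int)) (num_sec_tie : Int) : Prop :=
  queue ≠ [] ∧ ∀ r ∈ queue, 5 ≤ r.length
instance (queue : List (List Int)) (num_sec_tie : Int) : Decidable (Pre_h_fifo queue num_sec_tie) := by unfold Pre_h_fifo; infer_instance
def pvWitness_h_fifo : List (List Int) × Int := ([[0, 1, 2, 3, 4], [5, 6, 7, 8, 9]], 0)

def Spec_h_fifo (queue : List (List Int)) (num_sec_tie : Int) (out : List Int × Int) : Prop := out = h_fifo_alt queue num_sec_tie
instance (queue : List (List Int)) (num_sec_tie : Int) (out : List Int × Int) : Decidable (Spec_h_fifo queue num_sec_tie out) := by unfold Spec_h_fifo; infer_instance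

-- ===== CLAIM (what is proved, stated in full; the proofs are below) =====
def Claim_equal_h_fifo : Prop := ∀ (queue : List (List Int)) (num_sec_tie : Int), Dom_h_fifo queue num_sec_tie → Pre_h_fifo queue num_sec_tie → Spec_h_fifo queue num_sec_tie (h_fifo queue num_sec_tie)

-- ===== LEMMAS AND PROOFS =====

-- A's first-min-by-h fold, seeded with the head
def fmin (l : List (List Int)) (b : List Int) : List Int :=
  l.foldl (fun m x => if kH x < kH m then x else m) b

-- the node both programs select, as a function of the tie list
def gsel (ts : List (List Int)) : List Int :=
  match PySem.List.min? ts (fun t => kG t) with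
  | some m => m
  | none => []

lemma min?_cons_cons_lt {b v : List Int} (rest : List (List Int)) (key : List Int → Int)
    (h : key v < key b) :
    PySem.List.min? (b :: v :: rest) key = PySem.List.min? (v :: rest) key := by
  simp [PySem.List.min?, List.foldl, h]

lemma min?_cons_cons_ge {b v : List Int} (rest : List (List Int)) (key : List Int → Int)
    (h : ¬ key v < key b) :
    PySem.List.min? (b :: v :: rest) key = PySem.List.min? (b :: rest) key := by
  simp [PySem.List.min?, List.foldl, h]

lemma min?_cons_foldl (b : List Int) (l : List (List Int)) (key : List Int → Int) :
    PySem.List.min? (b :: l) key = some (l.foldl (fun m x => if key x < key m then x else m) b) := by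
  induction l generalizing b with
  | nil => simp [PySem.List.min?, List.foldl]
  | cons v t ih =>
    by_cases h : key v < key b
    · rw [min?_cons_cons_lt t key h, ih v]
      simp [List.foldl, h]
    · rw [min?_cons_cons_ge t key h, ih b]
      simp [List.foldl, h]

lemma fmin_le_seed (l : List (List Int)) (b : List Int) : kH (fmin l b) ≤ kH b := by
  induction l generalizing b with
  | nil => simp [fmin]
  | cons v t ih =>
    by_cases h : kH v < kH b
    · calc kH (fmin (v :: t) b) = kH (fmin t v) := by simp [fmin, List.foldl, h]
        _ ≤ kH v := ih v
        _ ≤ kH b := le_of_lt h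
    · calc kH (fmin (v :: t) b) = kH (fmin t b) := by simp [fmin, List.foldl, h]
        _ ≤ kH b := ih b

lemma fmin_key_eq (l : List (List Int)) {a b : List Int} (h : kH a = kH b) :
    kH (fmin l a) = kH (fmin l b) := by
  induction l generalizing a b with
  | nil => simpa [fmin] using h
  | cons v t ih =>
    by_cases h1 : kH v < kH a
    · simp [fmin, List.foldl, h1, h ▸ h1]
    · have h2 : ¬ kH v < kH b := h ▸ h1
      simpa [fmin, List.foldl, h1, h2] using ih h

lemma fmin_mem (l : List (List Int)) (b : List Int) : fmin l b ∈ b :: l := by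
  induction l generalizing b with
  | nil => simp [fmin]
  | cons v t ih =>
    by_cases h : kH v < kH b
    · have : fmin (v :: t) b = fmin t v := by simp [fmin, List.foldl, h]
      rw [this]
      have := ih v
      simp at this ⊢
      tauto
    · have : fmin (v :: t) b = fmin t b := by simp [fmin, List.foldl, h]
      rw [this]
      have := ih b
      simp at this ⊢
      tauto

-- the single-pass invariant: B's fold state in terms of A's three scans over the whole prefix
lemma fold_invariant (l : List (List Int)) (b : List Int) (c : Int) :
    l.foldl bstep (b, kH b, c) =
      (gsel ((b :: l).filter (fun t => kH t == kH (fmin l b))),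
       kH (fmin l b),
       (if kH b = kH (fmin l b) then c - 1 else 0)
         + ((b :: l).countP (fun t => kH t == kH (fmin l b)) : Int)) := by
  induction l generalizing b c with
  | nil =>
    simp [fmin, gsel, PySem.List.min?, List.foldl]
  | cons v t ih =>
    have hfb : kH (fmin t b) ≤ kH b := fmin_le_seed t b
    by_cases h1 : kH v < kH b
    · -- strictly better h: reset the state to (v, h(v), 1)
      have hstep : bstep (b, kH b, c) v = (v, kH v, 1) := by simp [bstep, h1]
      have hf : fmin (v :: t) b = fmin t v := by simp [fmin, List.foldl, h1]
      have hbne : ¬ (kH b = kH (fmin t v)) := by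
        have := fmin_le_seed t v
        omega
      have hfil : List.filter (fun t' => kH t' == kH (fmin t v)) (b :: v :: t)
          = List.filter (fun t' => kH t' == kH (fmin t v)) (v :: t) := by
        simp [List.filter_cons, beq_iff_eq, hbne]
      have hcnt : List.countP (fun t' => kH t' == kH (fmin t v)) (b :: v :: t)
          = List.countP (fun t' => kH t' == kH (fmin t v)) (v :: t) := by
        simp [List.countP_cons, beq_iff_eq, hbne]
      rw [List.foldl_cons, hstep, ih, hf, hfil, hcnt]
      simp only [Prod.mk.injEq, true_and]
      rw [if_neg hbne]
      split_ifs <;> omega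
    · by_cases h2 : kH v = kH b
      · -- equal h: a tie
        have hf : fmin (v :: t) b = fmin t b := by simp [fmin, List.foldl, h1]
        have hkey : kH (fmin t v) = kH (fmin t b) := fmin_key_eq t h2
        by_cases h4 : kH b = kH (fmin t b)
        · have h5 : kH v = kH (fmin t b) := h2.trans h4
          have hfil : List.filter (fun t' => kH t' == kH (fmin t b)) (b :: v :: t)
              = b :: v :: List.filter (fun t' => kH t' == kH (fmin t b)) t := by
            simp [List.filter_cons, beq_iff_eq, h4, h5]
          have hcnt : (List.countP (fun t' => kH t' == kH (fmin t b)) (b :: v :: t) : Int)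
              = 2 + (List.countP (fun t' => kH t' == kH (fmin t b)) t : Int) := by
            simp [List.countP_cons, beq_iff_eq, h4, h5]
            omega
          have hcnt2 : (List.countP (fun t' => kH t' == kH (fmin t b)) (v :: t) : Int)
              = 1 + (List.countP (fun t' => kH t' == kH (fmin t b)) t : Int) := by
            simp [List.countP_cons, beq_iff_eq, h5]
            omega
          have hfilv : List.filter (fun t' => kH t' == kH (fmin t b)) (v :: t)
              = v :: List.filter (fun t' => kH t' == kH (fmin t b)) t := by
            simp [List.filter_cons, beq_iff_eq, h5]
          by_cases h3 : kG v < kG b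
          · -- v replaces b as the tie-candidate
            have hstep : bstep (b, kH b, c) v = (v, kH v, c + 1) := by
              simp [bstep, h1, h2, h3]
            have hgs : gsel (b :: v :: List.filter (fun t' => kH t' == kH (fmin t b)) t)
                = gsel (v :: List.filter (fun t' => kH t' == kH (fmin t b)) t) := by
              simp [gsel, min?_cons_cons_lt _ _ h3]
            rw [List.foldl_cons, hstep, ih, hkey, hf, hfil, hgs, hfilv, hcnt, hcnt2]
            simp only [Prod.mk.injEq, true_and]
            rw [if_pos h5, if_pos h4]
            omega
          · -- b stays the tie-candidate
            have hstep : bstep (b, kH b, c) v = (b, kH b, c + 1) := by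
              simp [bstep, h1, h2, h3]
            have hgs : gsel (b :: v :: List.filter (fun t' => kH t' == kH (fmin t b)) t)
                = gsel (b :: List.filter (fun t' => kH t' == kH (fmin t b)) t) := by
              simp [gsel, min?_cons_cons_ge _ _ h3]
            have hfilb : List.filter (fun t' => kH t' == kH (fmin t b)) (b :: t)
                = b :: List.filter (fun t' => kH t' == kH (fmin t b)) t := by
              simp [List.filter_cons, beq_iff_eq, h4]
            have hcntb : (List.countP (fun t' => kH t' == kH (fmin t b)) (b :: t) : Int)
                = 1 + (List.countP (fun t' => kH t' == kH (fmin t b)) t : Int) := by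
              simp [List.countP_cons, beq_iff_eq, h4]
              omega
            rw [List.foldl_cons, hstep, ih, hf, hfil, hgs, hfilb, hcnt, hcntb]
            simp only [Prod.mk.injEq, true_and]
            rw [if_pos h4, if_pos h4]
            omega
        · -- the seed's h is not the global minimum: neither b nor v is a tie
          have h5 : ¬ (kH v = kH (fmin t b)) := fun h => h4 (h2 ▸ h)
          by_cases h3 : kG v < kG b
          · have hstep : bstep (b, kH b, c) v = (v, kH v, c + 1) := by
              simp [bstep, h1, h2, h3]
            have h4v : ¬ (kH v = kH (fmin t v)) := by rw [hkey]; exact h5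
            rw [List.foldl_cons, hstep, ih, hkey, hf]
            simp [List.filter_cons, List.countP_cons, beq_iff_eq, h4, h5, h4v]
          · have hstep : bstep (b, kH b, c) v = (b, kH b, c + 1) := by
              simp [bstep, h1, h2, h3]
            rw [List.foldl_cons, hstep, ih, hf]
            simp [List.filter_cons, List.countP_cons, beq_iff_eq, h4, h5]
      · -- strictly worse h: the state is unchanged
        have hstep : bstep (b, kH b, c) v = (b, kH b, c) := by simp [bstep, h1, h2]
        have hf : fmin (v :: t) b = fmin t b := by simp [fmin, List.foldl, h1]
        have hvne : ¬ (kH v = kH (fmin t b)) := by omega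
        rw [List.foldl_cons, hstep, ih, hf]
        simp [List.filter_cons, List.countP_cons, beq_iff_eq, hvne]

-- ===== VERDICT (by name: the statement is the Claim_ definition above) =====
theorem h_fifo_spec : Claim_equal_h_fifo := by
  intro queue num_sec_tie _hdom hpre
  unfold Spec_h_fifo
  obtain ⟨hne, _⟩ := hpre
  match queue with
  | [] => exact absurd rfl hne
  | x :: rest =>
    have hmin : PySem.List.min? (x :: rest) (fun t => kH t) = some (fmin rest x) :=
      min?_cons_foldl x rest (fun t => kH t)
    have hinv := fold_invariant rest x 1
    have hfm : fmin rest x ∈ (x :: rest).filter (fun t => kH t == kH (fmin rest x)) := by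
      rw [List.mem_filter]
      exact ⟨fmin_mem rest x, by simp⟩
    simp only [h_fifo, h_fifo_alt, hmin, hinv]
    set H := kH (fmin rest x) with hH
    set ts := (x :: rest).filter (fun t => kH t == H) with hts
    have hcount : (x :: rest).countP (fun t => kH t == H) = ts.length := by
      rw [hts, List.countP_eq_length_filter]
    have htsne : ts ≠ [] := by
      intro h
      rw [h] at hfm
      exact List.not_mem_nil hfm
    have hcond : ((if kH x = H then (1 : Int) - 1 else 0)
        + ((x :: rest).countP (fun t => kH t == H) : Int) > 1) ↔ ts.length > 1 := by
      have h0 : (if kH x = H then (1 : Int) - 1 else 0) = 0 := by split_ifs <;> rfl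
      rw [h0, hcount]
      omega
    by_cases hlen : ts.length > 1
    · -- tie branch: both return the first min-by-g element of the tie list
      obtain ⟨m, hm⟩ : ∃ m, PySem.List.min? ts (fun t => kG t) = some m := by
        cases hmm : PySem.List.min? ts (fun t => kG t) with
        | none => exact absurd ((PySem.List.min?_eq_none_iff ts _).mp hmm) htsne
        | some m => exact ⟨m, rfl⟩
      rw [if_pos hlen, if_pos (hcond.mpr hlen), hm]
      simp [gsel, hm]
    · rw [if_neg hlen, if_neg (fun h => hlen (hcond.mp h))]
      -- no tie: ts = [t] and both pick its only element
      have hlen1 : ts.length = 1 := by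
        have h0 : ts.length ≠ 0 := fun h => htsne (List.eq_nil_of_length_eq_zero h)
        omega
      obtain ⟨t, ht⟩ := List.length_eq_one_iff.mp hlen1
      rw [ht]
      simp [gsel, PySem.List.min?, List.foldl, PySem.List.pyGetD]
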